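-- pv_equiv track=rewrite | github.com/haemin123/oss-scout | server/tools/envcheck.py | build_preparation_checklist
-- ===== SOURCE A (Python) =====
-- from typing import Any
--
-- def build_preparation_checklist(
--     required_vars: list[dict[str, Any]],
--     env_files: list[str],
-- ) -> list[str]:
--     """Build a human-readable preparation checklist."""
--     checklist: list[str] = []
--     seen_services: set[str] = set()
--     step = 1
--
--     for var in required_vars:
--         service = var.get("service", "Unknown")
--         signup_url = var.get("signup_url")
--         if service == "Unknown" or service in seen_services:
--             continue
--         seen_services.add(service)
--
--         if signup_url:
--             checklist.append(f"{step}. {service} 계정 생성: {signup_url}")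
--         else:
--             checklist.append(f"{step}. {service} 설정 준비")
--         step += 1
--
--     if env_files:
--         env_file = env_files[0]
--         checklist.append(
--             f"{step}. {env_file}을 .env로 복사하고 값 입력"
--         )
--     else:
--         checklist.append(f"{step}. .env 파일 생성 후 환경변수 값 입력")
--
--     return checklist
-- ===== SOURCE B (Python) =====
-- def build_preparation_checklist(required_vars, env_files):
--     """Build a human-readable preparation checklist (two-pass: dedup, then format)."""
--     pairs = {}
--     for var in required_vars:
--         service = var.get("service", "Unknown")
--         if service != "Unknown" and service not in pairs:
--             pairs[service] = var.get("signup_url")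
--     items = list(pairs.items())
--     lines = [
--         (f"{i}. {service} 계정 생성: {url}" if url else f"{i}. {service} 설정 준비")
--         for i, (service, url) in enumerate(items, 1)
--     ]
--     step = len(items) + 1
--     if env_files:
--         lines.append(f"{step}. {env_files[0]}을 .env로 복사하고 값 입력")
--     else:
--         lines.append(f"{step}. .env 파일 생성 후 환경변수 값 입력")
--     return lines
-- ===== Notes on version B (the rewrite author's own statement) =====
-- stated objective: simpler
-- what changed: Replaces A's single loop threading a manual step counter, a seen-set and the growing checklist with a clean two-pass decomposition: one pass builds an ordered first-occurrence mapping service->signup_url (skipping 'Unknown'), then a comprehension over enumerate(items, 1) formats the lines and the env line uses step = len(items)+1.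
import Mathlib
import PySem

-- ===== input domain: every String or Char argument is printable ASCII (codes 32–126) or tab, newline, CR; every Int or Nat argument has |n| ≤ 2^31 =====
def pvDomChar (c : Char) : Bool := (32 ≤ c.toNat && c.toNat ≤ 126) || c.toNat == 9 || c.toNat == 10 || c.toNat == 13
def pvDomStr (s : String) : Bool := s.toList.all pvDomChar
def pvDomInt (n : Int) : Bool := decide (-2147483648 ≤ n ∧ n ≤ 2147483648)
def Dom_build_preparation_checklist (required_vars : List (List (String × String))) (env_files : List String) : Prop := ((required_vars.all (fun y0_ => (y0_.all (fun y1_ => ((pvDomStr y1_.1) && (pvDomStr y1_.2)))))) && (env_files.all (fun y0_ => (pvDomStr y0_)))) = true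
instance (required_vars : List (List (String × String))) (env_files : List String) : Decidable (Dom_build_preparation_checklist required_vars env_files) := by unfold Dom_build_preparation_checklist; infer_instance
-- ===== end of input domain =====

-- B replaces A's single counter-threading loop by a two-pass decomposition (ordered first-occurrence dict, then a formatting pass); return values proved equal on Dom.


-- ===== PORT A =====
-- literal port of A: one loop threading (checklist, seen_services, step)
def pvLoopA : List (List (String × String)) → List String → PySem.Set String → Int → (List String × PySem.Set String × Int)
  | [], checklist, seen, step => (checklist, seen, step)
  | var :: rest, checklist, seen, step =>
    let service := PySem.Dict.getD (PySem.Dict.mk var) "service" "Unknown"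
    let signup_url := PySem.Dict.get? (PySem.Dict.mk var) "signup_url"
    if service = "Unknown" ∨ service ∈ seen then
      pvLoopA rest checklist seen step
    else
      let seen' := PySem.Set.add seen service
      let line :=
        match signup_url with
        | some u =>
          if u ≠ "" then PySem.Int.toStr step ++ ". " ++ service ++ " 계정 생성: " ++ u
          else PySem.Int.toStr step ++ ". " ++ service ++ " 설정 준비"
        | none => PySem.Int.toStr step ++ ". " ++ service ++ " 설정 준비"
      pvLoopA rest (checklist ++ [line]) seen' (step + 1)

def pvEnvLine (step : Int) (env_files : List String) : String :=
  match env_files with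
  | env_file :: _ => PySem.Int.toStr step ++ ". " ++ env_file ++ "을 .env로 복사하고 값 입력"
  | [] => PySem.Int.toStr step ++ ". .env 파일 생성 후 환경변수 값 입력"

def build_preparation_checklist (required_vars : List (List (String × String))) (env_files : List String) : List String :=
  let r := pvLoopA required_vars [] PySem.Set.empty 1
  r.1 ++ [pvEnvLine r.2.2 env_files]

-- ===== PORT B =====
-- literal port of B: pass 1 collects the ordered first-occurrence dict, pass 2 formats
def pvCollect : List (List (String × String)) → PySem.Dict String (Option String) → PySem.Dict String (Option String)
  | [], pairs => pairs
  | var :: rest, pairs =>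
    let service := PySem.Dict.getD (PySem.Dict.mk var) "service" "Unknown"
    if service ≠ "Unknown" ∧ ¬ PySem.Dict.contains pairs service then
      pvCollect rest (pairs.insert service (PySem.Dict.get? (PySem.Dict.mk var) "signup_url"))
    else
      pvCollect rest pairs

def pvFmtB (i : Int) (p : String × Option String) : String :=
  match p.2 with
  | some u =>
    if u ≠ "" then PySem.Int.toStr i ++ ". " ++ p.1 ++ " 계정 생성: " ++ u
    else PySem.Int.toStr i ++ ". " ++ p.1 ++ " 설정 준비"
  | none => PySem.Int.toStr i ++ ". " ++ p.1 ++ " 설정 준비"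

def build_preparation_checklist_alt (required_vars : List (List (String × String))) (env_files : List String) : List String :=
  let items := (pvCollect required_vars PySem.Dict.empty).items
  let lines := (PySem.List.enumerate items 1).map (fun e => pvFmtB e.1 e.2)
  let step : Int := (items.length : Int) + 1
  lines ++ [match env_files with
            | env_file :: _ => PySem.Int.toStr step ++ ". " ++ env_file ++ "을 .env로 복사하고 값 입력"
            | [] => PySem.Int.toStr step ++ ". .env 파일 생성 후 환경변수 값 입력"]

-- ===== PRECONDITION & SPEC =====
def Spec_build_preparation_checklist (required_vars : List (List (String × String))) (env_files : List String) (out : List String) : Prop := out = build_preparation_checklist_alt required_vars env_files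
instance (required_vars : List (List (String × String))) (env_files : List String) (out : List String) : Decidable (Spec_build_preparation_checklist required_vars env_files out) := by unfold Spec_build_preparation_checklist; infer_instance

-- ===== CLAIM (what is proved, stated in full; the proofs are below) =====
def Claim_equal_build_preparation_checklist : Prop := ∀ (required_vars : List (List (String × String))) (env_files : List String), Dom_build_preparation_checklist required_vars env_files → Spec_build_preparation_checklist required_vars env_files (build_preparation_checklist required_vars env_files)

-- ===== LEMMAS AND PROOFS =====

-- the list of new (service, signup_url) pairs contributed by rv, given the services already seen
def pvNews : List (List (String × String)) → List String → List (String × Option String)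
  | [], _ => []
  | var :: rest, ks =>
    let s := PySem.Dict.getD (PySem.Dict.mk var) "service" "Unknown"
    if s = "Unknown" ∨ s ∈ ks then pvNews rest ks
    else (s, PySem.Dict.get? (PySem.Dict.mk var) "signup_url") :: pvNews rest (ks ++ [s])

def pvFmtFrom (i : Int) : List (String × Option String) → List String
  | [] => []
  | p :: ps => pvFmtB i p :: pvFmtFrom (i + 1) ps

lemma pvLoopA_eq : ∀ (rv : List (List (String × String))) (cl : List String) (seen : List String) (step : Int),
    pvLoopA rv cl seen step =
      (cl ++ pvFmtFrom step (pvNews rv seen), seen ++ (pvNews rv seen).map (·.1), step + (pvNews rv seen).length) := by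
  intro rv
  induction rv with
  | nil => intro cl seen step; simp [pvLoopA, pvNews, pvFmtFrom]
  | cons var rest ih =>
    intro cl seen step
    simp only [pvLoopA, pvNews]
    by_cases h : PySem.Dict.getD (PySem.Dict.mk var) "service" "Unknown" = "Unknown" ∨
        PySem.Dict.getD (PySem.Dict.mk var) "service" "Unknown" ∈ seen
    · rw [if_pos h, if_pos h, ih]
    · rw [if_neg h, if_neg h, ih]
      push Not at h
      rw [PySem.Set.add_of_not_mem h.2]
      simp [pvFmtFrom, pvFmtB]
      omega

lemma pvCollect_items_eq : ∀ (rv : List (List (String × String))) (pairs : PySem.Dict String (Option String)),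
    (pvCollect rv pairs).items = pairs.items ++ pvNews rv pairs.keys := by
  intro rv
  induction rv with
  | nil => intro pairs; simp [pvCollect, pvNews]
  | cons var rest ih =>
    intro pairs
    simp only [pvCollect, pvNews]
    by_cases h : PySem.Dict.getD (PySem.Dict.mk var) "service" "Unknown" = "Unknown" ∨
        PySem.Dict.getD (PySem.Dict.mk var) "service" "Unknown" ∈ pairs.keys
    · rw [if_pos h]
      have hc : ¬ (PySem.Dict.getD (PySem.Dict.mk var) "service" "Unknown" ≠ "Unknown" ∧
          ¬ (PySem.Dict.contains pairs (PySem.Dict.getD (PySem.Dict.mk var) "service" "Unknown")) = true) := by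
        rcases h with h | h
        · tauto
        · intro hh; exact hh.2 ((PySem.Dict.contains_iff_mem_keys pairs _).mpr h)
      rw [if_neg hc, ih]
    · rw [if_neg h]
      push Not at h
      have hnc : PySem.Dict.contains pairs (PySem.Dict.getD (PySem.Dict.mk var) "service" "Unknown") = false := by
        by_contra hcc
        exact h.2 ((PySem.Dict.contains_iff_mem_keys pairs _).mp (by simpa using hcc))
      rw [if_pos ⟨h.1, by simp [hnc]⟩, ih,
        PySem.Dict.items_insert_of_not_contains _ _ hnc,
        PySem.Dict.keys_insert_of_not_contains _ _ hnc]
      simp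

lemma pvEnum_fmt : ∀ (items : List (String × Option String)) (k : Int),
    (PySem.List.enumerate items k).map (fun e => pvFmtB e.1 e.2) = pvFmtFrom k items := by
  intro items
  induction items with
  | nil => intro k; simp [PySem.List.enumerate_nil, pvFmtFrom]
  | cons p ps ih => intro k; simp [PySem.List.enumerate_cons, pvFmtFrom, ih]

-- ===== VERDICT (by name: the statement is the Claim_ definition above) =====
theorem build_preparation_checklist_spec : Claim_equal_build_preparation_checklist := by
  intro required_vars env_files _
  show build_preparation_checklist required_vars env_files = build_preparation_checklist_alt required_vars env_files
  unfold build_preparation_checklist build_preparation_checklist_alt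
  rw [pvLoopA_eq, pvCollect_items_eq]
  have hk : (PySem.Dict.empty : PySem.Dict String (Option String)).keys = [] := rfl
  have hi : (PySem.Dict.empty : PySem.Dict String (Option String)).items = [] := rfl
  rw [hk, hi]
  have he : (PySem.Set.empty : PySem.Set String) = [] := rfl
  rw [he]
  simp only [List.nil_append, pvEnum_fmt]
  have hs : (1 : Int) + (pvNews required_vars []).length = ((pvNews required_vars []).length : Int) + 1 := by ring
  rw [hs]
  cases env_files <;> simp [pvEnvLine]
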